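-- pv_equiv track=rewrite | github.com/RavuAlHemio/rocketbot | cicd/version_stamp.py | rust_escape
-- ===== SOURCE A (Python) =====
-- def rust_escape(s: str) -> str:
--     ret = []
--     for c in s:
--         if c == "\\":
--             ret.append("\\\\")
--         elif c == '"':
--             ret.append('\\"')
--         else:
--             ret.append(c)
--     return "".join(ret)
-- ===== SOURCE B (Python) =====
-- def rust_escape(s: str) -> str:
--     return s.replace("\\", "\\\\").replace('"', '\\"')
-- ===== Notes on version B (the rewrite author's own statement) =====
-- stated objective: idiomatic
-- what changed: Replaced the per-character loop with an explicit accumulator list and join by two chained str.replace passes (backslash first, then quote), with no accumulator maintained by hand.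
import Mathlib
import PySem

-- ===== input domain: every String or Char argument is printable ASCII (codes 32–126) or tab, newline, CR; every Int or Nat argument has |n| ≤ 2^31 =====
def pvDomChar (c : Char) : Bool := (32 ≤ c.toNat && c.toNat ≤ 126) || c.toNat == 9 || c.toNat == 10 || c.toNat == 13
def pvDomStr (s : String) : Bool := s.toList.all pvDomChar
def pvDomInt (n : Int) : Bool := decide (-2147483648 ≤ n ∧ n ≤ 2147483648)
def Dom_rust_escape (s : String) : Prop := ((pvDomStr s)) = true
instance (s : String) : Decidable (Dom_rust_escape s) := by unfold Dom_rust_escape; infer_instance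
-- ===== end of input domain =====

-- B replaces A's per-character accumulator loop by two chained str.replace passes (backslash first, then quote).

-- ===== PORT A =====
-- A: build a list of string pieces character by character, then join with "".
def rust_escape (s : String) : String :=
  let ret : List String :=
    s.toList.foldl (fun ret c =>
      if c = '\\' then ret ++ ["\\\\"]
      else if c = '"' then ret ++ ["\\\""]
      else ret ++ [String.ofList [c]]) []
  PySem.Str.join "" ret

-- ===== PORT B =====
-- B: s.replace("\\", "\\\\").replace('"', '\\"')
def rust_escape_alt (s : String) : String :=
  PySem.Str.replace (PySem.Str.replace s "\\" "\\\\") "\"" "\\\""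

-- ===== PRECONDITION & SPEC =====
def Spec_rust_escape (s : String) (out : String) : Prop := out = rust_escape_alt s
instance (s : String) (out : String) : Decidable (Spec_rust_escape s out) := by unfold Spec_rust_escape; infer_instance

-- ===== CLAIM (what is proved, stated in full; the proofs are below) =====
def Claim_equal_rust_escape : Prop := ∀ (s : String), Dom_rust_escape s → Spec_rust_escape s (rust_escape s)

-- ===== LEMMAS AND PROOFS =====

-- join with empty separator is flatten
theorem pv_join_nil_flatten (ps : List (List Char)) : PySem.Chars.join [] ps = ps.flatten := by
  induction ps with
  | nil => simp [PySem.Chars.join_nil]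
  | cons a t ih => cases t <;> simp_all [PySem.Chars.join, List.intercalate, List.intersperse]

-- single-char replace is a flatMap
theorem pv_replace_go_single (o : Char) (new : List Char) (l : List Char) :
    ∀ fuel acc, l.length ≤ fuel →
      PySem.Chars.replace.go [o] new fuel l acc
        = acc.reverse ++ l.flatMap (fun c => if c = o then new else [c]) := by
  induction l with
  | nil => intro fuel acc _; cases fuel <;> simp [PySem.Chars.replace.go]
  | cons c t ih =>
    intro fuel acc hf
    cases fuel with
    | zero => simp at hf
    | succ n =>
      simp only [PySem.Chars.replace.go]
      by_cases hco : c = o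
      · have : List.isPrefixOf [o] (c :: t) = true := by simp [List.isPrefixOf, hco]
        rw [if_pos this]
        have := ih n (new.reverse ++ acc) (by simpa using Nat.le_of_succ_le_succ hf)
        simpa [hco] using this
      · have : List.isPrefixOf [o] (c :: t) = false := by
          simp [List.isPrefixOf]; exact fun h => (hco h.symm).elim
        rw [if_neg (by simp [this])]
        have := ih n (c :: acc) (Nat.le_of_succ_le_succ hf)
        simpa [hco] using this

theorem pv_replace_single (o : Char) (new : List Char) (l : List Char) :
    PySem.Chars.replace l [o] new = l.flatMap (fun c => if c = o then new else [c]) := by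
  rw [PySem.Chars.replace, if_neg (by simp)]
  exact pv_replace_go_single o new l l.length [] (le_refl _)

-- A's fold characterised as a flatMap
theorem pv_fold_join (l : List Char) (acc : List String) :
    (PySem.Str.join "" (l.foldl (fun ret c =>
      if c = '\\' then ret ++ ["\\\\"]
      else if c = '"' then ret ++ ["\\\""]
      else ret ++ [String.ofList [c]]) acc)).toList
    = (acc.map String.toList).flatten
      ++ l.flatMap (fun c =>
          if c = '\\' then ['\\', '\\']
          else if c = '"' then ['\\', '"'] else [c]) := by
  induction l generalizing acc with
  | nil => simp [PySem.Str.toList_join, pv_join_nil_flatten]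
  | cons c t ih =>
    simp only [List.foldl_cons]
    by_cases h1 : c = '\\'
    · simp [h1, ih]
    · by_cases h2 : c = '"'
      · simp [h1, h2, ih]
      · simp [h1, h2, ih]

theorem pv_comp (l : List Char) :
    ((l.flatMap (fun c => if c = '\\' then ['\\', '\\'] else [c])).flatMap
        (fun c => if c = '"' then ['\\', '"'] else [c]))
    = l.flatMap (fun c =>
        if c = '\\' then ['\\', '\\'] else if c = '"' then ['\\', '"'] else [c]) := by
  induction l with
  | nil => rfl
  | cons c t ih =>
    simp only [List.flatMap_cons, List.flatMap_append, ih]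
    by_cases h1 : c = '\\' <;> by_cases h2 : c = '"' <;> simp_all

theorem pv_main (s : String) : rust_escape s = rust_escape_alt s := by
  rw [← String.toList_inj]
  have hA := pv_fold_join s.toList []
  simp only [rust_escape, rust_escape_alt]
  rw [hA]
  have h1 : (PySem.Str.replace s "\\" "\\\\").toList
      = s.toList.flatMap (fun c => if c = '\\' then ['\\', '\\'] else [c]) := by
    rw [PySem.Str.toList_replace]; exact pv_replace_single '\\' ['\\', '\\'] s.toList
  have e1 : "\"".toList = ['"'] := rfl
  have e2 : "\\\"".toList = ['\\', '"'] := rfl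
  rw [PySem.Str.toList_replace, h1, e1, e2, pv_replace_single '"' ['\\', '"'], pv_comp]
  simp

-- ===== VERDICT (by name: the statement is the Claim_ definition above) =====
theorem rust_escape_spec : Claim_equal_rust_escape := by
  intro s _
  exact pv_main s
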